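-- pv_equiv track=rewrite | github.com/subashreevs/applied-algorithms | Assignments/Assignment2/AppliedAlgorithm-Assignment2.py | arrangePerformers
-- ===== SOURCE A (Python) =====
-- from collections import deque
-- from collections import deque
--
-- def arrangePerformers(nums):
--     # Sort the numbers in descending order
--     nums.sort(reverse=True)
--     # Initialize an empty deque to store the arrangement
--     queue = deque()
--
--     # Iterate through each number in the sorted list
--     for i in nums:
--         # If the queue is not empty
--         if queue:
--             # Move the last element to the front
--             queue.appendleft(queue.pop())
--         # Add the current number to the front of the queue
--         queue.appendleft(i)
--
--     # Convert the deque back to a list and return it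
--     return list(queue)
-- ===== SOURCE B (Python) =====
-- from collections import deque
--
-- def arrangePerformers(nums):
--     # Same side effect as A: sort the input list in place, descending.
--     nums.sort(reverse=True)
--     n = len(nums)
--     # Deque of POSITIONS in the final arrangement; assign sorted values
--     # ascending into precomputed slots instead of rotating a deque of values.
--     index = deque(range(n))
--     result = [0] * n
--     for card in reversed(nums):
--         result[index.popleft()] = card
--         if index:
--             index.append(index.popleft())
--     return result
-- ===== Notes on version B (the rewrite author's own statement) =====
-- stated objective: alternative
-- what changed: Instead of building a deque of values by repeated rotate-and-prepend over the descending list, B precomputes a deque of target positions and scatters the ascending values into a preallocated result array.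
import Mathlib
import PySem

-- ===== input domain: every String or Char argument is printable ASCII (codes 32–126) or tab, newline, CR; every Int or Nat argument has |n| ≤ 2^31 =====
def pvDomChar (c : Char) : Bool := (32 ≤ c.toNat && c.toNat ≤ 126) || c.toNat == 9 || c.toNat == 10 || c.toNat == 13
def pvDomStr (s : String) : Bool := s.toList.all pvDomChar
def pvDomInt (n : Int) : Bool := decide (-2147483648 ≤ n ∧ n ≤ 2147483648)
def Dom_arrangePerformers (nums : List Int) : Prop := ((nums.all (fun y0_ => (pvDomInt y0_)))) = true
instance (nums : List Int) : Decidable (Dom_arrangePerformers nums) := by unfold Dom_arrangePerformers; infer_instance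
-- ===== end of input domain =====

-- B replaces A's rotate-and-prepend deque of VALUES by a precomputed deque of target
-- POSITIONS filled with the ascending values ("alternative" decomposition, same cost).
-- Both versions sort the input in place (Python side effect); the equivalence proved
-- here is about the RETURN value.

-- ===== PORT A =====
-- queue.appendleft(queue.pop()) on a nonempty deque: move the last element to the front.
def pvRotA (q : List Int) : List Int :=
  match q.getLast? with
  | some x => x :: q.dropLast
  | none => q

def arrangePerformers (nums : List Int) : List Int :=
  let sorted := PySem.List.sorted nums (fun x => x) (reverse := true)  -- nums.sort(reverse=True)
  sorted.foldl (fun queue i =>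
    let queue := if queue.isEmpty then queue else pvRotA queue  -- if queue: appendleft(pop())
    i :: queue) []                                              -- queue.appendleft(i)

-- ===== PORT B =====
-- the loop of Source B: scatter cards (ascending) into the positions dealt by the index deque.
-- index.popleft() on an empty deque cannot occur (|index| = |cards| throughout); the
-- defensive `| _, [] => r` arm is unreachable on B's actual call.
def pvFillB (cards : List Int) (index : List Nat) (result : List Int) : List Int :=
  match cards, index with
  | [], _ => result
  | _, [] => result
  | c :: cs, i :: rest =>
      pvFillB cs (match rest with | [] => [] | j :: rest' => rest' ++ [j])  -- if index: append(popleft())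
        (result.set i c)                                                    -- result[index.popleft()] = card

def arrangePerformers_alt (nums : List Int) : List Int :=
  let sorted := PySem.List.sorted nums (fun x => x) (reverse := true)  -- nums.sort(reverse=True)
  let n := sorted.length                                               -- n = len(nums) (nums is sorted in place)
  pvFillB sorted.reverse (List.range n) (List.replicate n 0)

-- ===== PRECONDITION & SPEC =====
def Spec_arrangePerformers (nums : List Int) (out : List Int) : Prop := out = arrangePerformers_alt nums
instance (nums : List Int) (out : List Int) : Decidable (Spec_arrangePerformers nums out) := by unfold Spec_arrangePerformers; infer_instance

-- ===== CLAIM (what is proved, stated in full; the proofs are below) =====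
def Claim_equal_arrangePerformers : Prop := ∀ (nums : List Int), Dom_arrangePerformers nums → Spec_arrangePerformers nums (arrangePerformers nums)

-- ===== LEMMAS AND PROOFS =====

-- A's queue after processing the cards, as a structural recursion on the ASCENDING list.
def pvQa : List Int → List Int
  | [] => []
  | x :: cs => x :: pvRotA (pvQa cs)

theorem pvRotA_append_singleton (L : List Int) (a : Int) :
    pvRotA (L ++ [a]) = a :: L := by
  simp [pvRotA]

theorem pvStep_eq (q : List Int) (i : Int) :
    (let q' := if q.isEmpty then q else pvRotA q; i :: q') = i :: pvRotA q := by
  cases q <;> simp [pvRotA]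

theorem foldlA_eq_pvQa (m : List Int) :
    m.reverse.foldl (fun queue i =>
      let queue := if queue.isEmpty then queue else pvRotA queue
      i :: queue) [] = pvQa m := by
  induction m with
  | nil => rfl
  | cons x cs ih =>
      simp only [List.reverse_cons, List.foldl_append, List.foldl_cons, List.foldl_nil, ih]
      exact pvStep_eq (pvQa cs) x

theorem length_pvFillB (cards : List Int) (index : List Nat) (r : List Int) :
    (pvFillB cards index r).length = r.length := by
  induction cards generalizing index r with
  | nil => simp [pvFillB]
  | cons c cs ih =>
      cases index with
      | nil => simp [pvFillB]
      | cons i rest => simp [pvFillB, ih]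

-- Main invariant: filling cards into distinct in-range positions `index` writes exactly
-- A's final queue `pvQa cards` at those positions (in index order) and nothing else.
theorem pvFillB_spec (cards : List Int) :
    ∀ (index : List Nat) (r : List Int), index.Nodup → (∀ i ∈ index, i < r.length) →
      index.length = cards.length →
      (index.map (fun i => (pvFillB cards index r).getD i 0) = pvQa cards ∧
       ∀ j, j ∉ index → (pvFillB cards index r).getD j 0 = r.getD j 0) := by
  induction cards with
  | nil =>
      intro index r _ _ hlen
      have : index = [] := List.eq_nil_of_length_eq_zero hlen
      subst this
      simp [pvFillB, pvQa]
  | cons c cs ih =>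
      intro index r hnd hbd hlen
      cases index with
      | nil => simp at hlen
      | cons i rest =>
          have hilt : i < r.length := hbd i (List.mem_cons_self ..)
          have hndrest : rest.Nodup := (List.nodup_cons.mp hnd).2
          have hinrest : i ∉ rest := (List.nodup_cons.mp hnd).1
          cases rest with
          | nil =>
              have hcs : cs = [] := by simp at hlen; exact hlen
              subst hcs
              constructor
              · simp [pvFillB, pvQa, pvRotA, List.getD, hilt]
              · intro j hj
                have hj1 : j ≠ i := by simp at hj; exact hj
                simp [pvFillB, List.getD, Ne.symm hj1]
          | cons j J =>
              have hstep : pvFillB (c :: cs) (i :: j :: J) r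
                  = pvFillB cs (J ++ [j]) (r.set i c) := by
                simp [pvFillB]
              have hperm : (J ++ [j]).Perm (j :: J) := List.perm_append_singleton j J
              have hnd' : (J ++ [j]).Nodup := hperm.nodup_iff.mpr hndrest
              have hsub : ∀ x ∈ J ++ [j], x ∈ j :: J := fun x hx => hperm.mem_iff.mp hx
              have hbd' : ∀ x ∈ J ++ [j], x < (r.set i c).length := by
                intro x hx
                simpa using hbd x (List.mem_cons_of_mem _ (hsub x hx))
              obtain ⟨hmap, hoff⟩ := ih (J ++ [j]) (r.set i c) hnd' hbd' (by
                have := hperm.length_eq; simp at hlen ⊢; omega)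
              rw [hstep]
              constructor
              · have hi_not : i ∉ J ++ [j] := fun h => hinrest (hsub i h)
                have hgi : (pvFillB cs (J ++ [j]) (r.set i c)).getD i 0 = c := by
                  rw [hoff i hi_not]
                  simp [List.getD, hilt]
                simp only [List.map_cons, hgi, pvQa]
                simp only [List.map_append, List.map_cons, List.map_nil] at hmap
                rw [← hmap, pvRotA_append_singleton]
              · intro k hk
                have hk1 : k ≠ i := fun h => hk (h ▸ List.mem_cons_self ..)
                have hk2 : k ∉ J ++ [j] := fun h => hk (List.mem_cons_of_mem _ (hsub k h))
                rw [hoff k hk2]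
                simp [List.getD, Ne.symm hk1]

theorem map_getD_range (L : List Int) :
    (List.range L.length).map (fun i => L.getD i 0) = L := by
  apply List.ext_getElem
  · simp
  · intro i h1 h2
    simp [List.getD, h2]

-- ===== VERDICT (by name: the statement is the Claim_ definition above) =====
theorem arrangePerformers_spec : Claim_equal_arrangePerformers := by
  intro nums _
  unfold Spec_arrangePerformers arrangePerformers arrangePerformers_alt
  set d := PySem.List.sorted nums (fun x => x) (reverse := true) with hd
  have hA : d.foldl (fun queue i =>
      let queue := if queue.isEmpty then queue else pvRotA queue
      i :: queue) [] = pvQa d.reverse := by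
    have := foldlA_eq_pvQa d.reverse
    simpa using this
  have hn : d.length = d.reverse.length := by simp
  obtain ⟨hmap, _⟩ := pvFillB_spec d.reverse (List.range d.length) (List.replicate d.length 0)
      (List.nodup_range) (by simp) (by simp)
  have hlenfill : (pvFillB d.reverse (List.range d.length) (List.replicate d.length 0)).length
      = d.length := by simp [length_pvFillB]
  have : (List.range (pvFillB d.reverse (List.range d.length) (List.replicate d.length 0)).length).map
      (fun i => (pvFillB d.reverse (List.range d.length) (List.replicate d.length 0)).getD i 0)
      = pvQa d.reverse := by rw [hlenfill]; exact hmap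
  rw [map_getD_range] at this
  rw [hA, ← this]
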